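-- pv_equiv track=rewrite | github.com/AlphaTechnic/Algorithm_Study | 2021_random_set_self_practice/using_python/조이스틱.py | calc
-- ===== SOURCE A (Python) =====
-- def calc(t, s):
--     length = len(s)
--     ans = 0
--     if t == 0:
--         for i in range(length - 1, -1, -1):
--             if s[i] != 'A':
--                 ans = i
--                 break
--         return ans
--     if t == 1:
--         for i in range(1, length):
--             if s[i] != 'A':
--                 ans = length - i
--                 break
--         return ans
--     if t == 2:
--         mid = (length - 1) // 2
--         for i in range(mid - 1, -1, -1):
--             if s[i] != 'A':
--                 ans += (mid - i) * 2
--                 break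
--         for i in range(mid, length):
--             if s[i] != 'A':
--                 ans += (length - i + 1)
--                 break
--     if t == 3:
--         mid = (length - 1) // 2
--         for i in range(mid, length):
--             if s[i] != 'A':
--                 ans += (length - i) * 2
--                 break
--         for i in range(mid - 1, -1, -1):
--             if s[i] != 'A':
--                 ans += i
--                 break
--     return ans
-- ===== SOURCE B (Python) =====
-- def calc(t, s):
--     length = len(s)
--     pos = [i for i, c in enumerate(s) if c != 'A']
--     if t == 0:
--         return pos[-1] if pos else 0
--     if t == 1:
--         tail = [i for i in pos if i >= 1]
--         return length - tail[0] if tail else 0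
--     if t != 2 and t != 3:
--         return 0
--     mid = (length - 1) // 2
--     lefts = [i for i in pos if i < mid]
--     rights = [i for i in pos if i >= mid]
--     ans = 0
--     if t == 2:
--         if lefts:
--             ans += (mid - lefts[-1]) * 2
--         if rights:
--             ans += length - rights[0] + 1
--     else:
--         if rights:
--             ans += (length - rights[0]) * 2
--         if lefts:
--             ans += lefts[-1]
--     return ans
-- ===== Notes on version B (the rewrite author's own statement) =====
-- stated objective: alternative
-- what changed: B collects all non-'A' positions once into a list and answers every variant by reading the first/last element of a bound-filtered view of that list, instead of A's four direction-specific index scans with break.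
-- outside the precondition, e.g. on calc(2, ''): A raises IndexError, B returns 0; on calc(3, ''): A raises IndexError, B returns 0
import Mathlib
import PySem

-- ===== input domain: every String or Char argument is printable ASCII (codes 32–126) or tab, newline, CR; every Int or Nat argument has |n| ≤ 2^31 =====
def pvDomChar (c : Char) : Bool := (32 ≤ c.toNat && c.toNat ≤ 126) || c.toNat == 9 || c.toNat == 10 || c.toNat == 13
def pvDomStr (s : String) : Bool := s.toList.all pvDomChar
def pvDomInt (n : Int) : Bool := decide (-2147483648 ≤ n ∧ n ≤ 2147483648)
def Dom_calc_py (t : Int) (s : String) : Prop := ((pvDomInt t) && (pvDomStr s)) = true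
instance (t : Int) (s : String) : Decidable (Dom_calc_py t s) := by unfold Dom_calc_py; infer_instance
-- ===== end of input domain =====

-- B replaces A's four break-on-first-hit index scans by one pass collecting the non-'A' positions,
-- then reads the needed first/last filtered position from that list (alternative decomposition, same cost).

-- ===== PORT A =====
-- "for i in <idxs>: if s[i] != 'A': <ans from i>; break" — returns the first index hit, none if no break
def pvScanA (cs : List Char) (idxs : List Int) : Option Int :=
  match idxs with
  | [] => none
  | i :: rest =>
    if ((PySem.List.pyGet? cs i).getD 'A') ≠ 'A' then some i else pvScanA cs rest

def calc_py (t : Int) (s : String) : Int :=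
  let cs := s.toList
  let length : Int := cs.length
  if t = 0 then
    match pvScanA cs (PySem.List.pyRange (length - 1) (-1) (-1)) with
    | some i => i
    | none => 0
  else if t = 1 then
    match pvScanA cs (PySem.List.pyRange 1 length 1) with
    | some i => length - i
    | none => 0
  else
    let ans2 : Int :=
      if t = 2 then
        let mid := PySem.Int.floordiv (length - 1) 2
        (match pvScanA cs (PySem.List.pyRange (mid - 1) (-1) (-1)) with
         | some i => (mid - i) * 2
         | none => 0)
        + (match pvScanA cs (PySem.List.pyRange mid length 1) with
           | some i => length - i + 1
           | none => 0)
      else 0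
    if t = 3 then
      let mid := PySem.Int.floordiv (length - 1) 2
      ans2
      + (match pvScanA cs (PySem.List.pyRange mid length 1) with
         | some i => (length - i) * 2
         | none => 0)
      + (match pvScanA cs (PySem.List.pyRange (mid - 1) (-1) (-1)) with
         | some i => i
         | none => 0)
    else ans2

-- ===== PORT B =====
def calc_py_alt (t : Int) (s : String) : Int :=
  let cs := s.toList
  let length : Int := cs.length
  let pos : List Int :=
    (PySem.List.enumerate cs).filterMap (fun p => if p.2 ≠ 'A' then some p.1 else none)
  if t = 0 then
    (pos.getLast?).getD 0
  else if t = 1 then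
    let tail := pos.filter (fun i => decide (1 ≤ i))
    match tail.head? with
    | some i => length - i
    | none => 0
  else if t ≠ 2 ∧ t ≠ 3 then 0
  else
    let mid := PySem.Int.floordiv (length - 1) 2
    let lefts := pos.filter (fun i => decide (i < mid))
    let rights := pos.filter (fun i => decide (mid ≤ i))
    if t = 2 then
      (match lefts.getLast? with
       | some i => (mid - i) * 2
       | none => 0)
      + (match rights.head? with
         | some i => length - i + 1
         | none => 0)
    else
      (match rights.head? with
       | some i => (length - i) * 2
       | none => 0)
      + (match lefts.getLast? with
         | some i => i
         | none => 0)

-- ===== PRECONDITION & SPEC =====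
-- Pre_ only excludes the empty string for t ∈ {2, 3}: there A's second scan evaluates s[-1]
-- on an empty string and raises IndexError.
def Pre_calc_py (t : Int) (s : String) : Prop := s ≠ "" ∨ (t ≠ 2 ∧ t ≠ 3)
instance (t : Int) (s : String) : Decidable (Pre_calc_py t s) := by unfold Pre_calc_py; infer_instance
def pvWitness_calc_py : Int × String := (2, "BAAAB")

def Spec_calc_py (t : Int) (s : String) (out : Int) : Prop := out = calc_py_alt t s
instance (t : Int) (s : String) (out : Int) : Decidable (Spec_calc_py t s out) := by unfold Spec_calc_py; infer_instance

-- ===== CLAIM (what is proved, stated in full; the proofs are below) =====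
def Claim_equal_calc_py : Prop := ∀ (t : Int) (s : String), Dom_calc_py t s → Pre_calc_py t s → Spec_calc_py t s (calc_py t s)

-- ===== LEMMAS AND PROOFS =====

-- the Boolean test A's scans and B's pos-collection both perform
def pvQ (cs : List Char) (i : Int) : Bool := ((PySem.List.pyGet? cs i).getD 'A') ≠ 'A'

theorem pvScanA_eq_find? (cs : List Char) (idxs : List Int) :
    pvScanA cs idxs = idxs.find? (pvQ cs) := by
  induction idxs with
  | nil => rfl
  | cons i rest ih =>
    by_cases h : ((PySem.List.pyGet? cs i).getD 'A') ≠ 'A' <;>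
      simp [pvScanA, List.find?, pvQ, h, ih]

theorem pvPos_eq (cs : List Char) :
    (PySem.List.enumerate cs).filterMap (fun p => if p.2 ≠ 'A' then some p.1 else none)
      = (PySem.List.pyRange 0 (cs.length : Int) 1).filter (pvQ cs) := by
  rw [PySem.List.enumerate_eq_map_pyRange cs 'A', List.filterMap_map]
  have hlen : PySem.List.len cs = (cs.length : Int) := by simp [PySem.List.len]
  rw [hlen]
  induction (PySem.List.pyRange 0 (cs.length : Int) 1) with
  | nil => rfl
  | cons j rest ih =>
    by_cases h : PySem.List.pyGetD cs j 'A' ≠ 'A' <;>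
      simp_all [pvQ, PySem.List.pyGetD]

theorem pvFind_reverse (l : List Int) (q : Int → Bool) :
    l.reverse.find? q = (l.filter q).getLast? := by
  rw [← List.head?_filter, List.filter_reverse, List.head?_reverse]

theorem pvRange_ge (a N : Int) (h : 0 ≤ a) :
    PySem.List.pyRange a N 1 = (PySem.List.pyRange 0 N 1).filter (fun x => decide (a ≤ x)) := by
  by_cases hN : N ≤ a
  · rw [PySem.List.pyRange_one_eq_nil hN, Eq.comm, List.filter_eq_nil_iff]
    intro x hx; have := PySem.List.mem_pyRange_one.mp hx; simp; omega
  · rw [PySem.List.pyRange_one_append 0 a N h (by omega), List.filter_append]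
    rw [List.filter_eq_nil_iff.mpr, List.filter_eq_self.mpr]
    · simp
    · intro x hx; have := PySem.List.mem_pyRange_one.mp hx; simp; omega
    · intro x hx; have := PySem.List.mem_pyRange_one.mp hx; simp; omega

theorem pvRange_lt (m N : Int) (hm : m ≤ N) :
    PySem.List.pyRange 0 m 1 = (PySem.List.pyRange 0 N 1).filter (fun x => decide (x < m)) := by
  by_cases h0 : m ≤ 0
  · rw [PySem.List.pyRange_one_eq_nil h0, Eq.comm, List.filter_eq_nil_iff]
    intro x hx; have := PySem.List.mem_pyRange_one.mp hx; simp; omega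
  · rw [PySem.List.pyRange_one_append 0 m N (by omega) hm, List.filter_append]
    rw [List.filter_eq_self.mpr, List.filter_eq_nil_iff.mpr]
    · simp
    · intro x hx; have := PySem.List.mem_pyRange_one.mp hx; simp; omega
    · intro x hx; have := PySem.List.mem_pyRange_one.mp hx; simp; omega

-- upward scan from a ≥ 0 = head of pos filtered to i ≥ a
theorem pvScan_up (cs : List Char) (a : Int) (h : 0 ≤ a) :
    pvScanA cs (PySem.List.pyRange a (cs.length : Int) 1)
      = (((PySem.List.pyRange 0 (cs.length : Int) 1).filter (pvQ cs)).filter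
          (fun i => decide (a ≤ i))).head? := by
  rw [pvScanA_eq_find?, pvRange_ge a _ h, ← List.head?_filter, List.filter_filter,
      List.filter_filter]
  congr 1
  exact List.filter_congr (fun x _ => Bool.and_comm _ _)

-- downward scan from m-1 to 0 = last of pos filtered to i < m
theorem pvScan_down (cs : List Char) (m : Int) (hm : m ≤ (cs.length : Int)) :
    pvScanA cs (PySem.List.pyRange (m - 1) (-1) (-1))
      = (((PySem.List.pyRange 0 (cs.length : Int) 1).filter (pvQ cs)).filter
          (fun i => decide (i < m))).getLast? := by
  rw [pvScanA_eq_find?, PySem.List.pyRange_neg_one_eq_reverse]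
  have : (-1 : Int) + 1 = 0 := by omega
  rw [this]
  have : m - 1 + 1 = m := by omega
  rw [this, pvFind_reverse, pvRange_lt m _ hm, List.filter_filter, List.filter_filter]
  congr 1
  exact List.filter_congr (fun x _ => Bool.and_comm _ _)

-- ===== VERDICT (by name: the statement is the Claim_ definition above) =====
theorem calc_py_spec : Claim_equal_calc_py := by
  intro t s _ hpre
  unfold Spec_calc_py calc_py calc_py_alt
  simp only []
  rw [pvPos_eq s.toList]
  by_cases h0 : t = 0
  · subst h0
    simp only [if_pos rfl, if_true, if_false, if_true, if_false]
    rw [pvScanA_eq_find?]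
    have hr : PySem.List.pyRange ((s.toList.length : Int) - 1) (-1) (-1)
        = (PySem.List.pyRange 0 (s.toList.length : Int) 1).reverse := by
      rw [PySem.List.pyRange_neg_one_eq_reverse]; norm_num
    rw [hr, pvFind_reverse]
    cases ((PySem.List.pyRange 0 (s.toList.length : Int) 1).filter (pvQ s.toList)).getLast? <;> rfl
  · by_cases h1 : t = 1
    · subst h1
      simp only [if_neg (show ¬((1:Int) = 0) by norm_num), if_pos rfl, if_true, if_false, if_true, if_false]
      rw [pvScan_up s.toList 1 (by omega)]
    · by_cases h23 : t ≠ 2 ∧ t ≠ 3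
      · simp only [if_neg h0, if_neg h1, if_pos h23, if_neg h23.1, if_neg h23.2]
      · have hne : s.toList ≠ [] := by
          rcases hpre with h | h
          · simp [h]
          · exact absurd h h23
        have hlen : 0 < (s.toList.length : Int) := by
          cases hc : s.toList with
          | nil => exact absurd hc hne
          | cons _ _ => simp [hc]
        have hmid : 0 ≤ PySem.Int.floordiv ((s.toList.length : Int) - 1) 2
            ∧ PySem.Int.floordiv ((s.toList.length : Int) - 1) 2 ≤ (s.toList.length : Int) - 1 := by
          have := PySem.Int.floordiv_two_mid_bounds (lo := 0) (hi := (s.toList.length : Int) - 1)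
            (by omega)
          simpa using this
        by_cases h2 : t = 2
        · subst h2
          simp only [if_neg (show ¬((2:Int) = 0) by norm_num),
            if_neg (show ¬((2:Int) = 1) by norm_num), if_pos rfl, if_true, if_false,
            if_neg (show ¬((2:Int) = 3) by norm_num),
            if_neg (show ¬((2:Int) ≠ 2 ∧ (2:Int) ≠ 3) by norm_num)]
          rw [pvScan_up s.toList (PySem.Int.floordiv ((s.toList.length : Int) - 1) 2) hmid.1,
            pvScan_down s.toList (PySem.Int.floordiv ((s.toList.length : Int) - 1) 2) (by omega)]
        · have h3 : t = 3 := by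
            rcases not_and_or.mp h23 with h | h
            · exact absurd (not_not.mp h) h2
            · exact not_not.mp h
          subst h3
          simp only [if_neg (show ¬((3:Int) = 0) by norm_num),
            if_neg (show ¬((3:Int) = 1) by norm_num),
            if_neg (show ¬((3:Int) = 2) by norm_num), if_pos rfl, if_true, if_false,
            if_neg (show ¬((3:Int) ≠ 2 ∧ (3:Int) ≠ 3) by norm_num)]
          rw [pvScan_up s.toList (PySem.Int.floordiv ((s.toList.length : Int) - 1) 2) hmid.1,
            pvScan_down s.toList (PySem.Int.floordiv ((s.toList.length : Int) - 1) 2) (by omega)]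
          ring
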